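-- pv_equiv track=rewrite | github.com/Kartik22105/AI_Battle_Arena | api_server_lite.py | extract_answer_from_context
-- ===== SOURCE A (Python) =====
-- def extract_answer_from_context(question: str, context: str) -> str:
--     """Intelligently extract answer from context"""
--     if not context:
--         return "Information not available in the document."
--
--     # Split into sentences
--     sentences = context.split('.')
--     question_lower = question.lower()
--     question_words = set(w.lower() for w in question.split() if len(w) > 3)
--
--     # Score and filter sentences
--     scored_sentences = []
--     for sent in sentences:
--         sent = sent.strip()
--         if len(sent) > 20:  # Only consider meaningful sentences
--             # Count matching words
--             matches = sum(1 for word in sent.lower().split() if word in question_words)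
--             if matches > 0:
--                 scored_sentences.append((matches, sent))
--
--     # Return top sentences
--     if scored_sentences:
--         scored_sentences.sort(reverse=True, key=lambda x: x[0])
--         answer = '. '.join([s[1] for s in scored_sentences[:2]])
--         return answer[:512]
--
--     # Fallback: return first meaningful sentence
--     for sent in sentences:
--         sent = sent.strip()
--         if len(sent) > 30:
--             return sent[:512]
--
--     return context[:512]
-- ===== SOURCE B (Python) =====
-- def extract_answer_from_context(question: str, context: str) -> str:
--     """Single pass: track the two best-scoring sentences instead of sort-then-slice."""
--     if not context:
--         return "Information not available in the document."
--
--     sentences = context.split('.')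
--     question_words = set(w.lower() for w in question.split() if len(w) > 3)
--
--     best = None    # (score, sentence) with the highest score, earliest on ties
--     second = None  # runner-up
--     for sent in sentences:
--         sent = sent.strip()
--         if len(sent) <= 20:
--             continue
--         score = sum(w in question_words for w in sent.lower().split())
--         if score == 0:
--             continue
--         if best is None or score > best[0]:
--             best, second = (score, sent), best
--         elif second is None or score > second[0]:
--             second = (score, sent)
--
--     if best is not None:
--         parts = [best[1]] if second is None else [best[1], second[1]]
--         return '. '.join(parts)[:512]
--
--     hit = next((s.strip() for s in sentences if len(s.strip()) > 30), None)
--     if hit is not None: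
--         return hit[:512]
--     return context[:512]
-- ===== Notes on version B (the rewrite author's own statement) =====
-- stated objective: alternative
-- what changed: Replaces A's append-to-a-list-then-stable-reverse-sort-then-take-2 step by a single pass that keeps only the best and second-best (score, sentence) pairs, using strict '>' comparisons so tied scores keep A's original-order tie-break.
import Mathlib
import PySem

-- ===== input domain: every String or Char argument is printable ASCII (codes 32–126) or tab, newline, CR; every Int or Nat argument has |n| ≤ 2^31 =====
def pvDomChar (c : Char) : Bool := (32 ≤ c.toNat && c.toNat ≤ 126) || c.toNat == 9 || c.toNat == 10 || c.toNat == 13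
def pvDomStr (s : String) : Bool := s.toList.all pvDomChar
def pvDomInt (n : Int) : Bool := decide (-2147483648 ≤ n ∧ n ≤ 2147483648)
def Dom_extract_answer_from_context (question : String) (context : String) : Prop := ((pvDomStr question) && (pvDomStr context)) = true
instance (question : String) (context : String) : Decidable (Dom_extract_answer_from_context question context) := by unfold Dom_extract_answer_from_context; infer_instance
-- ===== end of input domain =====

-- B replaces A's build-a-list-then-stable-reverse-sort step by a single pass keeping only the two
-- best-scoring sentences (strict '>' preserves A's original-order tie-break); same return value.

-- ===== PORT A =====
-- A's scoring loop: strip each sentence, keep it if len > 20 and it mcount > 0 question words,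
-- appending (mcount, sent) to the accumulator list.
def pvScoreLoopA (qwords : PySem.Set String) (sentences : List String) : List (Int × String) :=
  sentences.foldl (fun acc sent0 =>
    let sent := PySem.Str.strip sent0
    if 20 < PySem.Str.len sent then
      let mcount : Int := (PySem.Str.split₀ (PySem.Str.lower sent)).foldl
        (fun n word => if PySem.Set.contains qwords word then n + 1 else n) 0
      if 0 < mcount then acc ++ [(mcount, sent)] else acc
    else acc) []

-- A's fallback: return the first stripped sentence of length > 30 (truncated), else context[:512].
def pvFallbackA (sentences : List String) (context : String) : String :=
  match sentences with
  | [] => PySem.Str.slice context none (some 512)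
  | s0 :: rest =>
    let sent := PySem.Str.strip s0
    if 30 < PySem.Str.len sent then PySem.Str.slice sent none (some 512)
    else pvFallbackA rest context

def extract_answer_from_context (question : String) (context : String) : String :=
  if context.toList = [] then "Information not available in the document." else
  let sentences := (PySem.Str.split? context ".").getD []   -- sep "." ≠ "", so split? is some
  let question_words : PySem.Set String :=
    PySem.Set.ofList (((PySem.Str.split₀ question).filter (fun w => 3 < PySem.Str.len w)).map PySem.Str.lower)
  let scored := pvScoreLoopA question_words sentences
  if scored ≠ [] then
    let answer := PySem.Str.join ". "
      ((PySem.List.slice (PySem.List.sorted scored (fun p => p.1) true) none (some 2)).map (fun s => s.2))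
    PySem.Str.slice answer none (some 512)
  else pvFallbackA sentences context

-- ===== PORT B =====
-- B's single-pass top-2 update: strict '>' so an equal score never displaces an earlier sentence.
def pvStep (st : Option (Int × String) × Option (Int × String)) (x : Int × String) :
    Option (Int × String) × Option (Int × String) :=
  match st with
  | (none, _) => (some x, none)
  | (some b, second) =>
    if b.1 < x.1 then (some x, some b)
    else match second with
      | none => (some b, some x)
      | some s => if s.1 < x.1 then (some b, some x) else (some b, some s)

def extract_answer_from_context_alt (question : String) (context : String) : String :=
  if context.toList = [] then "Information not available in the document." else
  let sentences := (PySem.Str.split? context ".").getD []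
  let question_words : PySem.Set String :=
    PySem.Set.ofList (((PySem.Str.split₀ question).filter (fun w => 3 < PySem.Str.len w)).map PySem.Str.lower)
  let st := sentences.foldl (fun st sent0 =>
      let sent := PySem.Str.strip sent0
      if PySem.Str.len sent ≤ 20 then st
      else
        let score : Int := ((PySem.Str.split₀ (PySem.Str.lower sent)).countP
          (fun w => PySem.Set.contains question_words w) : Nat)
        if score = 0 then st else pvStep st (score, sent))
    ((none, none) : Option (Int × String) × Option (Int × String))
  match st with
  | (some b, some s) => PySem.Str.slice (PySem.Str.join ". " [b.2, s.2]) none (some 512)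
  | (some b, none) => PySem.Str.slice (PySem.Str.join ". " [b.2]) none (some 512)
  | (none, _) =>
    match sentences.find? (fun s => 30 < PySem.Str.len (PySem.Str.strip s)) with
    | some s => PySem.Str.slice (PySem.Str.strip s) none (some 512)
    | none => PySem.Str.slice context none (some 512)

-- ===== PRECONDITION & SPEC =====
def Spec_extract_answer_from_context (question : String) (context : String) (out : String) : Prop := out = extract_answer_from_context_alt question context
instance (question : String) (context : String) (out : String) : Decidable (Spec_extract_answer_from_context question context out) := by unfold Spec_extract_answer_from_context; infer_instance

-- ===== CLAIM (what is proved, stated in full; the proofs are below) =====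
def Claim_equal_extract_answer_from_context : Prop := ∀ (question : String) (context : String), Dom_extract_answer_from_context question context → Spec_extract_answer_from_context question context (extract_answer_from_context question context)

-- ===== LEMMAS AND PROOFS =====

-- The per-sentence qualifier both loops agree on: some (score, stripped) iff the sentence counts.
def pvQualify (qwords : PySem.Set String) (sent0 : String) : Option (Int × String) :=
  let sent := PySem.Str.strip sent0
  if 20 < PySem.Str.len sent then
    let score : Int := ((PySem.Str.split₀ (PySem.Str.lower sent)).countP
      (fun w => PySem.Set.contains qwords w) : Nat)
    if score = 0 then none else some (score, sent)
  else none

lemma pvInsertBy_nil {α : Type} (bef : α → α → Bool) (x : α) :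
    PySem.List.insertBy bef x [] = [x] := rfl

lemma pvInsertBy_cons {α : Type} (bef : α → α → Bool) (x y : α) (ys : List α) :
    PySem.List.insertBy bef x (y :: ys)
      = if bef x y then x :: y :: ys else y :: PySem.List.insertBy bef x ys := rfl

lemma pvBodyA (qw : PySem.Set String) (acc : List (Int × String)) (x : String) :
    (let sent := PySem.Str.strip x
     if 20 < PySem.Str.len sent then
       let mcount : Int := (PySem.Str.split₀ (PySem.Str.lower sent)).foldl
         (fun n word => if PySem.Set.contains qw word then n + 1 else n) 0
       if 0 < mcount then acc ++ [(mcount, sent)] else acc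
     else acc) = acc ++ (pvQualify qw x).toList := by
  simp only [pvQualify]
  rw [PySem.List.foldl_if_add_one (p := fun w => PySem.Set.contains qw w), zero_add]
  by_cases h20 : 20 < PySem.Str.len (PySem.Str.strip x)
  · rw [if_pos h20, if_pos h20]
    by_cases hz : (((PySem.Str.split₀ (PySem.Str.lower (PySem.Str.strip x))).countP
        (fun w => PySem.Set.contains qw w) : Nat) : Int) = 0
    · rw [if_neg (by omega), if_pos hz]; simp
    · rw [if_pos (by omega), if_neg hz]; rfl
  · rw [if_neg h20, if_neg h20]; simp

lemma pvScoreLoopA_eq (qw : PySem.Set String) (l : List String) :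
    pvScoreLoopA qw l = l.filterMap (pvQualify qw) := by
  unfold pvScoreLoopA
  suffices h : ∀ acc : List (Int × String), l.foldl (fun acc sent0 =>
      let sent := PySem.Str.strip sent0
      if 20 < PySem.Str.len sent then
        let mcount : Int := (PySem.Str.split₀ (PySem.Str.lower sent)).foldl
          (fun n word => if PySem.Set.contains qw word then n + 1 else n) 0
        if 0 < mcount then acc ++ [(mcount, sent)] else acc
      else acc) acc = acc ++ l.filterMap (pvQualify qw) from
    (h []).trans (List.nil_append _)
  induction l with
  | nil => intro acc; simp
  | cons x t ih =>
    intro acc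
    rw [List.foldl_cons, ih, List.filterMap_cons]
    rw [pvBodyA]
    cases pvQualify qw x <;> simp

lemma pvBodyB (qw : PySem.Set String)
    (st : Option (Int × String) × Option (Int × String)) (x : String) :
    (let sent := PySem.Str.strip x
     if PySem.Str.len sent ≤ 20 then st
     else
       let score : Int := ((PySem.Str.split₀ (PySem.Str.lower sent)).countP
         (fun w => PySem.Set.contains qw w) : Nat)
       if score = 0 then st else pvStep st (score, sent))
    = (pvQualify qw x).elim st (pvStep st) := by
  simp only [pvQualify]
  by_cases h20 : 20 < PySem.Str.len (PySem.Str.strip x)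
  · rw [if_neg (not_le.mpr h20), if_pos h20]
    by_cases hz : (((PySem.Str.split₀ (PySem.Str.lower (PySem.Str.strip x))).countP
        (fun w => PySem.Set.contains qw w) : Nat) : Int) = 0
    · rw [if_pos hz, if_pos hz]; rfl
    · rw [if_neg hz, if_neg hz]; rfl
  · rw [if_pos (not_lt.mp h20), if_neg h20]; rfl

lemma pvFoldB_eq (qw : PySem.Set String) (l : List String)
    (st : Option (Int × String) × Option (Int × String)) :
    l.foldl (fun st sent0 =>
      let sent := PySem.Str.strip sent0
      if PySem.Str.len sent ≤ 20 then st
      else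
        let score : Int := ((PySem.Str.split₀ (PySem.Str.lower sent)).countP
          (fun w => PySem.Set.contains qw w) : Nat)
        if score = 0 then st else pvStep st (score, sent)) st
    = (l.filterMap (pvQualify qw)).foldl pvStep st := by
  induction l generalizing st with
  | nil => rfl
  | cons x t ih =>
    rw [List.foldl_cons, ih, List.filterMap_cons]
    rw [pvBodyB]
    cases pvQualify qw x <;> simp

-- Core: B's single-pass top-2 state is the first two elements of A's stable reverse sort.
lemma pvTop2 (l : List (Int × String)) :
    l.foldl pvStep (none, none)
      = ((PySem.List.sorted l (fun p => p.1) true)[0]?,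
         (PySem.List.sorted l (fun p => p.1) true)[1]?) := by
  induction l using List.reverseRecOn with
  | nil => rfl
  | append_singleton t x ih =>
    have hs : PySem.List.sorted (t ++ [x]) (fun p : Int × String => p.1) true
        = PySem.List.insertBy (fun a b => decide (b.1 < a.1)) x
            (PySem.List.sorted t (fun p => p.1) true) := by
      rw [PySem.List.sorted_rev_eq_foldl_insertBy, PySem.List.sorted_rev_eq_foldl_insertBy,
        List.foldl_append, List.foldl_cons, List.foldl_nil]
    rw [List.foldl_append, List.foldl_cons, List.foldl_nil, ih, hs]
    rcases PySem.List.sorted t (fun p : Int × String => p.1) true with _ | ⟨a, _ | ⟨b, rest⟩⟩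
    · rfl
    · by_cases h1 : a.1 < x.1 <;>
        simp [pvInsertBy_cons, pvInsertBy_nil, pvStep, h1]
    · by_cases h1 : a.1 < x.1
      · simp [pvInsertBy_cons, pvStep, h1]
      · by_cases h2 : b.1 < x.1 <;>
          simp [pvInsertBy_cons, pvStep, h1, h2]

lemma pvFallback_eq (sentences : List String) (context : String) :
    pvFallbackA sentences context
      = match sentences.find? (fun s => 30 < PySem.Str.len (PySem.Str.strip s)) with
        | some s => PySem.Str.slice (PySem.Str.strip s) none (some 512)
        | none => PySem.Str.slice context none (some 512) := by
  induction sentences with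
  | nil => rfl
  | cons x t ih =>
    rw [pvFallbackA, List.find?_cons]
    by_cases h : 30 < PySem.Str.len (PySem.Str.strip x)
    · rw [decide_eq_true h, if_pos h]
    · rw [decide_eq_false h, if_neg h, ih]

-- ===== VERDICT (by name: the statement is the Claim_ definition above) =====
theorem extract_answer_from_context_spec : Claim_equal_extract_answer_from_context := by
  intro question context _
  unfold Spec_extract_answer_from_context
  by_cases hempty : context.toList = []
  · simp [extract_answer_from_context, extract_answer_from_context_alt, hempty]
  · simp only [extract_answer_from_context, extract_answer_from_context_alt, if_neg hempty]
    rw [pvScoreLoopA_eq, pvFoldB_eq, pvTop2, pvFallback_eq]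
    rcases hso : PySem.List.sorted
        (((PySem.Str.split? context ".").getD []).filterMap
          (pvQualify (PySem.Set.ofList (((PySem.Str.split₀ question).filter
            (fun w => 3 < PySem.Str.len w)).map PySem.Str.lower))))
        (fun p => p.1) true with _ | ⟨a, _ | ⟨b, rest⟩⟩
    · have hnil := (PySem.List.sorted_eq_nil_iff _ _ true).mp hso
      rw [hnil]
      simp
    · have hne : (((PySem.Str.split? context ".").getD []).filterMap
          (pvQualify (PySem.Set.ofList (((PySem.Str.split₀ question).filter
            (fun w => 3 < PySem.Str.len w)).map PySem.Str.lower)))) ≠ [] := by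
        intro h
        rw [h] at hso
        rw [show PySem.List.sorted ([] : List (Int × String)) (fun p => p.1) true = []
          from rfl] at hso
        simp at hso
      rw [if_pos hne, PySem.List.slice_to _ (by norm_num)]
      rfl
    · have hne : (((PySem.Str.split? context ".").getD []).filterMap
          (pvQualify (PySem.Set.ofList (((PySem.Str.split₀ question).filter
            (fun w => 3 < PySem.Str.len w)).map PySem.Str.lower)))) ≠ [] := by
        intro h
        rw [h] at hso
        rw [show PySem.List.sorted ([] : List (Int × String)) (fun p => p.1) true = []
          from rfl] at hso
        simp at hso
      rw [if_pos hne, PySem.List.slice_to _ (by norm_num)]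
      rfl
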